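-- pv_equiv track=rewrite | github.com/gavrielhan/NBClassifier_LinkedIn_feed | linkeidn.py | get_post_content
-- ===== SOURCE A (Python) =====
-- def get_post_content(data):
--     my_feed=[]
--     for dic in data:
--         my_feed.append(dic['Post Content'])
--         if len(my_feed)>1:
--             if my_feed[len(my_feed)-1]=="Show more Feed Updates":
--                 my_feed.pop(len(my_feed)-1)
--             if len(my_feed) > 1:
--                 if my_feed[len(my_feed)-1]==my_feed[len(my_feed)-2]:
--                     my_feed.pop(len(my_feed)-1)
--     return my_feed
-- ===== SOURCE B (Python) =====
-- def get_post_content(data):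
--     contents = [dic['Post Content'] for dic in data]
--     if not contents:
--         return []
--     kept = [c for c in contents[1:] if c != "Show more Feed Updates"]
--     result = [contents[0]]
--     for c in kept:
--         if result[-1] != c:
--             result.append(c)
--     return result
-- ===== Notes on version B (the rewrite author's own statement) =====
-- stated objective: simpler
-- what changed: B extracts all contents first, filters placeholders from the tail in one pass, then collapses consecutive duplicates with an append-only accumulator, instead of A's single interleaved append-then-pop loop.
import Mathlib
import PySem

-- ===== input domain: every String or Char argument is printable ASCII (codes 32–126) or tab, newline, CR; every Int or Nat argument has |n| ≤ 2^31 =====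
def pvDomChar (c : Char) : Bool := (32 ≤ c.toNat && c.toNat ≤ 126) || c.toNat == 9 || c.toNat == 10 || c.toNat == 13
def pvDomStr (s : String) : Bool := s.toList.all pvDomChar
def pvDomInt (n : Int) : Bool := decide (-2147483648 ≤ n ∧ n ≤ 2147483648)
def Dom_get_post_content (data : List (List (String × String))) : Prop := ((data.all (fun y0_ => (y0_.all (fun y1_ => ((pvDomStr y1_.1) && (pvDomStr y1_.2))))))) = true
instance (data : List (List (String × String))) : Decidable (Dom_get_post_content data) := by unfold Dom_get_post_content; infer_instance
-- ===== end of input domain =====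

-- ===== PORT A =====
-- B separates placeholder-filtering and duplicate-collapsing into two passes; objective: simpler.
-- Both ports keep the feed/result list REVERSED (Python appends/pops at the end ⇔ cons/tail at the
-- head here) and reverse once at the end; this is exact for A's append/pop-at-end and B's append.
def getPostStepA (r : List String) (dic : List (String × String)) : List String :=
  let r1 := (List.lookup "Post Content" dic).getD "" :: r   -- my_feed.append(dic['Post Content']); Pre_ guarantees the key exists (KeyError otherwise)
  if r1.length > 1 then
    let r2 := if r1.head! = "Show more Feed Updates" then r1.tail else r1
    if r2.length > 1 then
      if r2.head! = r2.tail.head! then r2.tail else r2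
    else r2
  else r1

def get_post_content (data : List (List (String × String))) : List String :=
  (data.foldl getPostStepA []).reverse

-- ===== PORT B =====
def get_post_content_alt (data : List (List (String × String))) : List String :=
  let contents := data.map (fun dic => (List.lookup "Post Content" dic).getD "")
  match contents with
  | [] => []
  | h :: t =>
    let kept := t.filter (fun c => c != "Show more Feed Updates")
    (kept.foldl (fun acc c => if acc.head! = c then acc else c :: acc) [h]).reverse

-- ===== PRECONDITION & SPEC =====
-- Pre_ excludes exactly the inputs on which Python A raises KeyError: some dict lacks 'Post Content'.
def Pre_get_post_content (data : List (List (String × String))) : Prop :=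
  ∀ dic ∈ data, (List.lookup "Post Content" dic).isSome = true
instance (data : List (List (String × String))) : Decidable (Pre_get_post_content data) := by
  unfold Pre_get_post_content; infer_instance
def pvWitness_get_post_content : (List (List (String × String))) :=
  [[("Post Content", "hello")], [("Post Content", "Show more Feed Updates")], [("Post Content", "hello")]]
def Spec_get_post_content (data : List (List (String × String))) (out : List String) : Prop := out = get_post_content_alt data
instance (data : List (List (String × String))) (out : List String) : Decidable (Spec_get_post_content data out) := by unfold Spec_get_post_content; infer_instance

-- ===== CLAIM (what is proved, stated in full; the proofs are below) =====
def Claim_equal_get_post_content : Prop := ∀ (data : List (List (String × String))), Dom_get_post_content data → Pre_get_post_content data → Spec_get_post_content data (get_post_content data)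

-- ===== LEMMAS AND PROOFS =====
-- Core invariant: once the (reversed) feed is nonempty and its first two entries differ,
-- A's interleaved loop equals B's collapse-fold over the placeholder-filtered contents.
lemma foldA_eq : ∀ (l : List (List (String × String))) (x : String) (r : List String),
    (∀ b t, r = b :: t → x ≠ b) →
    l.foldl getPostStepA (x :: r)
      = ((l.map (fun dic => (List.lookup "Post Content" dic).getD "")).filter
          (fun c => c != "Show more Feed Updates")).foldl
          (fun acc c => if acc.head! = c then acc else c :: acc) (x :: r) := by
  intro l
  induction l with
  | nil => intro x r _; rfl
  | cons dic l' ih =>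
    intro x r hinv
    simp only [List.foldl_cons, List.map_cons, List.filter_cons]
    by_cases hp : (List.lookup "Post Content" dic).getD "" = "Show more Feed Updates"
    · have hstep : getPostStepA (x :: r) dic = x :: r := by
        unfold getPostStepA
        simp only [hp]
        cases r with
        | nil => simp
        | cons b t =>
          have hxb : x ≠ b := hinv b t rfl
          simp [hxb]
      rw [hstep, hp]
      simpa using ih x r hinv
    · by_cases hd : (List.lookup "Post Content" dic).getD "" = x
      · have hxP : x ≠ "Show more Feed Updates" := fun h => hp (hd.trans h)
        have hstep : getPostStepA (x :: r) dic = x :: r := by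
          unfold getPostStepA
          simp [hd, hxP]
        rw [hstep]
        have := ih x r hinv
        simp only [hp, bne_iff_ne, ne_eq, not_false_iff, if_pos]
        simp only [List.foldl_cons, List.head!, hd]
        simpa [hd] using this
      · have hstep : getPostStepA (x :: r) dic
            = (List.lookup "Post Content" dic).getD "" :: x :: r := by
          unfold getPostStepA
          simp [hp, hd]
        rw [hstep]
        have hinv' : ∀ b t, (x :: r) = b :: t →
            (List.lookup "Post Content" dic).getD "" ≠ b := by
          intro b t hb
          cases hb; exact hd
        have := ih ((List.lookup "Post Content" dic).getD "") (x :: r) hinv'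
        simp only [hp, bne_iff_ne, ne_eq, not_false_iff, if_pos]
        simp only [List.foldl_cons, List.head!]
        rw [if_neg (fun h => hd h.symm)]
        exact this

-- ===== VERDICT (by name: the statement is the Claim_ definition above) =====
theorem get_post_content_spec : Claim_equal_get_post_content := by
  intro data _ _
  unfold Spec_get_post_content get_post_content get_post_content_alt
  cases data with
  | nil => rfl
  | cons dic rest =>
    simp only [List.foldl_cons, List.map_cons]
    have h0 : getPostStepA [] dic = [(List.lookup "Post Content" dic).getD ""] := by
      unfold getPostStepA; simp
    rw [h0, foldA_eq rest ((List.lookup "Post Content" dic).getD "") [] (by intro b t h; cases h)]
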